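-- pv_equiv track=rewrite | github.com/CzerPDX/comp-img-project | src/dispersionImg.py | __getMostCommonOrMediumValue
-- ===== SOURCE A (Python) =====
-- def __getMostCommonOrMediumValue(intArray):
--     retValue = 0
--     counts = {}
--
--     # If there are no entries in intArray
--     if len(intArray) < 1:
--         raise Exception(f'Error! No entries in the intArray')
--     # Otherwise there is at least 1 entry so start counting!
--     else:
--         for number in intArray:
--             # If the number already exists as a key in counts dictionary, increment it
--             if number in counts:
--                 counts[number] += 1
--             # Otherwise we need to initialize the entry to 1 count
--             else:
--                 counts[number] = 1
--
--     # If there is only one entry in counts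
--     if (len(counts) == 1):
--         retValue = intArray[0]
--     # Otherwise there are multiple entries in counts
--     else:
--         # Sort the keys from lowest count to highest because we will need it sorted in a minute
--         sortedCounts = dict(sorted(counts.items(), key=lambda item: item[0]))
--
--         # Use list comprehension and max() to get the keys that correspond with the highest values
--         maxValue = max(sortedCounts.values())
--         maxKeys = [key for key, value in sortedCounts.items() if value == maxValue]
--
--         # Now we know all the numbers tied for max and they are sorted in order
--         lengthOfMaxKeys = len(maxKeys)
--
--         # If there's only one entry
--         if (lengthOfMaxKeys == 1):
--             retValue = maxKeys[0]
--         # Otherwise there are multiple entries we need to find the tie-breaker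
--         else:
--             # If the number of maxKeys is odd
--             if (lengthOfMaxKeys % 2) != 0:
--                 retValue = maxKeys[lengthOfMaxKeys // 2]
--             else:
--                 retValue = maxKeys[lengthOfMaxKeys // 2 - 1]
--
--
--     return retValue
-- ===== SOURCE B (Python) =====
-- def __getMostCommonOrMediumValue(intArray):
--     if not intArray:
--         raise Exception('Error! No entries in the intArray')
--     s = sorted(intArray)
--     n = len(s)
--     bestLen = 0
--     tied = []
--     i = 0
--     while i < n:
--         j = i
--         while j < n and s[j] == s[i]:
--             j += 1
--         runLen = j - i
--         if runLen > bestLen: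
--             bestLen = runLen
--             tied = [s[i]]
--         elif runLen == bestLen:
--             tied.append(s[i])
--         i = j
--     return tied[(len(tied) - 1) // 2]
-- ===== Notes on version B (the rewrite author's own statement) =====
-- stated objective: alternative
-- what changed: B uses no dictionary at all: it sorts the whole input array and scans it once over runs of equal values, keeping the current best run length and the list of run values tied for it, then picks the lower median of the tied values.
import Mathlib
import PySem

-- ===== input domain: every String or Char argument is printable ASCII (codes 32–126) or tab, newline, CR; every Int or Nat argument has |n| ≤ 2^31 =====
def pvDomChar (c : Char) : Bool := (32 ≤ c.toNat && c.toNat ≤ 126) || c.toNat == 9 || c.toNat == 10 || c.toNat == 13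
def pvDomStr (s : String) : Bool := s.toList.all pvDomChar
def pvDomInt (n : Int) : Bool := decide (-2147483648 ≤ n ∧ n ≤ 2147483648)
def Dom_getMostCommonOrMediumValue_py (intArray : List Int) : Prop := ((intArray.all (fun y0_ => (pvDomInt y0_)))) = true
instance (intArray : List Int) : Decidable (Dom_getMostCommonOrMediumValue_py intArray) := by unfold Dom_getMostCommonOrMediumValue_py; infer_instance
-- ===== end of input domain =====

-- B uses no dictionary: it sorts the input array and scans it once over runs of equal values,
-- tracking the best run length and the run values tied for it; return values only, no mutation.

-- ===== PORT A =====
def getMostCommonOrMediumValue_py (intArray : List Int) : Int :=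
  if intArray.length < 1 then 0  -- Python raises Exception here; excluded by Pre_
  else
    let counts := intArray.foldl
      (fun d number =>
        if d.contains number then d.insert number (d.getD number 0 + 1)
        else d.insert number 1)
      (PySem.Dict.empty : PySem.Dict Int Int)
    if counts.size = 1 then (PySem.List.pyGet? intArray 0).getD 0
    else
      let sortedCounts := PySem.Dict.ofList (PySem.List.sorted counts.items (fun item => item.1))
      let maxValue := (PySem.List.max? sortedCounts.values (fun v => v)).getD 0
      let maxKeys := (sortedCounts.items.filter (fun p => p.2 == maxValue)).map (fun p => p.1)
      let lengthOfMaxKeys := maxKeys.length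
      if lengthOfMaxKeys = 1 then maxKeys.getD 0 0
      else if lengthOfMaxKeys % 2 ≠ 0 then maxKeys.getD (lengthOfMaxKeys / 2) 0
      else maxKeys.getD (lengthOfMaxKeys / 2 - 1) 0

-- ===== PORT B =====
-- The two index-based while loops of Source B become structural recursion on the remaining
-- suffix of the sorted list: the inner loop "j = i; while j < n and s[j] == s[i]" is
-- takeWhile/dropWhile of the current run, the outer loop carries (bestLen, tied).
def pvScanRuns : List Int → Int → List Int → List Int
  | [], _, tied => tied
  | x :: rest, bestLen, tied =>
    let run := (x :: rest).takeWhile (fun y => y == x)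
    let rem := (x :: rest).dropWhile (fun y => y == x)
    let runLen : Int := run.length
    if runLen > bestLen then pvScanRuns rem runLen [x]
    else if runLen == bestLen then pvScanRuns rem bestLen (tied ++ [x])
    else pvScanRuns rem bestLen tied
  termination_by l _ _ => l.length
  decreasing_by
    all_goals
      simp only [List.dropWhile_cons, beq_self_eq_true, if_true, List.length_cons]
      exact Nat.lt_succ_of_le (List.length_dropWhile_le _ _)

def getMostCommonOrMediumValue_py_alt (intArray : List Int) : Int :=
  if intArray = [] then 0  -- Python raises Exception here; excluded by Pre_
  else
    let s := PySem.List.sorted intArray (fun x => x)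
    let tied := pvScanRuns s 0 []
    tied.getD ((tied.length - 1) / 2) 0

-- ===== PRECONDITION & SPEC =====
-- A (and B) raise Exception on the empty list; Pre_ excludes exactly that input.
def Pre_getMostCommonOrMediumValue_py (intArray : List Int) : Prop := intArray ≠ []
instance (intArray : List Int) : Decidable (Pre_getMostCommonOrMediumValue_py intArray) := by unfold Pre_getMostCommonOrMediumValue_py; infer_instance
def pvWitness_getMostCommonOrMediumValue_py : List Int := [1, 1, 2]
def Spec_getMostCommonOrMediumValue_py (intArray : List Int) (out : Int) : Prop := out = getMostCommonOrMediumValue_py_alt intArray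
instance (intArray : List Int) (out : Int) : Decidable (Spec_getMostCommonOrMediumValue_py intArray out) := by unfold Spec_getMostCommonOrMediumValue_py; infer_instance

-- ===== CLAIM (what is proved, stated in full; the proofs are below) =====
def Claim_equal_getMostCommonOrMediumValue_py : Prop := ∀ (intArray : List Int), Dom_getMostCommonOrMediumValue_py intArray → Pre_getMostCommonOrMediumValue_py intArray → Spec_getMostCommonOrMediumValue_py intArray (getMostCommonOrMediumValue_py intArray)

-- ===== LEMMAS AND PROOFS =====

-- Canonical value both programs are reduced to: S = sorted distinct values, M = max count,
-- T = keys tied for M in increasing order, answer = T[(|T|-1)/2].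
def pvCanon (xs : List Int) : Int :=
  let S := PySem.List.sorted (PySem.Set.ofList xs) (fun k => k)
  let T := S.filter (fun k => ((xs.count k : Int) ==
    (PySem.List.max? (S.map (fun k => (xs.count k : Int))) (fun v => v)).getD 0))
  T.getD ((T.length - 1) / 2) 0

theorem countsA_eq_counter (xs : List Int) :
    xs.foldl (fun d number =>
        if d.contains number then d.insert number (d.getD number 0 + 1)
        else d.insert number 1) PySem.Dict.empty = PySem.Dict.counter xs := by
  rw [← PySem.Dict.foldl_insert_getD_add_one_eq_counter]
  congr 1
  funext d n
  by_cases h : d.contains n = true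
  · simp [h]
  · rw [if_neg h, PySem.Dict.getD_of_not_contains d 0 (by simpa using h)]
    norm_num

-- dict(sorted(counter.items(), key=fst)) keeps exactly the sorted items (keys are distinct).
theorem items_ofList_of_nodup (l : List (Int × Int)) (h : (l.map Prod.fst).Nodup) :
    (PySem.Dict.ofList l).items = l := by
  have := PySem.Dict.items_foldl_insert_fresh l Prod.fst Prod.snd PySem.Dict.empty
      (by intro a _; simp) h
  simpa [PySem.Dict.ofList, PySem.Dict.update] using this

-- sorting Counter(xs).items() by key = mapping the sorted distinct values through k ↦ (k, count k)
theorem sorted_items_counter (xs : List Int) :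
    PySem.List.sorted ((PySem.Set.ofList xs).map (fun k => (k, (xs.count k : Int))))
        (fun item => item.1) =
      (PySem.List.sorted (PySem.Set.ofList xs) (fun k => k)).map
        (fun k => (k, (xs.count k : Int))) := by
  apply PySem.List.sorted_eq_of_perm_of_pairwise_lt
  · exact ((PySem.List.sorted_perm _ _ _).map _)
  · exact List.Pairwise.map _ (by intro a b hab; simpa using hab)
      (PySem.List.sorted_ofList_pairwise_lt xs)

theorem A_eq_canon (xs : List Int) (h : xs ≠ []) :
    getMostCommonOrMediumValue_py xs = pvCanon xs := by
  unfold getMostCommonOrMediumValue_py pvCanon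
  rw [if_neg (by simpa using h : ¬ xs.length < 1)]
  dsimp only
  have hnodup : (((PySem.List.sorted (PySem.Set.ofList xs) fun k => k).map
      (fun k => (k, (xs.count k : Int)))).map Prod.fst).Nodup := by
    rw [List.map_map]
    have he : (Prod.fst ∘ fun k => (k, (xs.count k : Int))) = id := rfl
    rw [he, List.map_id]
    exact ((PySem.List.sorted_perm _ _ _).nodup_iff).mpr (PySem.Set.nodup_ofList xs)
  simp only [countsA_eq_counter, PySem.Dict.values, PySem.Dict.size, sorted_items_counter,
    items_ofList_of_nodup _ hnodup, PySem.Dict.items_counter,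
    List.map_map, List.filter_map, List.length_map, Function.comp_def]
  simp only [List.map_id']
  by_cases hS : (PySem.Set.ofList xs).length = 1
  · rw [if_pos hS]
    obtain ⟨x, rest, rfl⟩ := List.exists_cons_of_ne_nil h
    obtain ⟨k, hk⟩ := List.length_eq_one_iff.mp hS
    have hx : x = k := by
      have hmem : x ∈ PySem.Set.ofList (x :: rest) := (PySem.Set.mem_ofList _ _).mpr (by simp)
      rw [hk] at hmem
      simpa using hmem
    subst hx
    rw [hk]
    have hT : PySem.List.sorted [x] (fun k => k) = [x] :=
      PySem.List.sorted_eq_of_perm_of_pairwise_lt _ _ _ (List.Perm.refl _) (by simp)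
    rw [hT]
    simp [PySem.List.pyGet?, PySem.List.pyIdx?, PySem.List.max?_id_cons]
  · rw [if_neg hS]
    split_ifs with h1 h2
    · congr 1
      omega
    · congr 1
      omega
    · congr 1
      omega

-- ---- B side ----

-- the outer while loop, re-expressed over the (run value, run length) pairs it visits
def pvPairScan : List (Int × Int) → Int → List Int → List Int
  | [], _, t => t
  | (k, c) :: rest, b, t =>
    if c > b then pvPairScan rest c [k]
    else if c == b then pvPairScan rest b (t ++ [k])
    else pvPairScan rest b t

theorem count_flatMap_replicate (S : List Int) (cnt : Int → Nat) (y : Int) (hnd : S.Nodup) :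
    (S.flatMap (fun k => List.replicate (cnt k) k)).count y
      = if y ∈ S then cnt y else 0 := by
  induction S with
  | nil => simp
  | cons k S ih =>
    rcases List.nodup_cons.mp hnd with ⟨hk, hnd'⟩
    simp only [List.flatMap_cons, List.count_append, ih hnd', List.count_replicate,
      List.mem_cons]
    by_cases hyk : y = k
    · subst hyk
      simp [hk]
    · simp [hyk, Ne.symm hyk]

theorem pairwise_flatMap_replicate (S : List Int) (cnt : Int → Nat)
    (hlt : S.Pairwise (· < ·)) :
    (S.flatMap (fun k => List.replicate (cnt k) k)).Pairwise (· ≤ ·) := by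
  induction S with
  | nil => simp
  | cons k S ih =>
    rcases List.pairwise_cons.mp hlt with ⟨hk, hlt'⟩
    rw [List.flatMap_cons, List.pairwise_append]
    refine ⟨List.pairwise_replicate.mpr (by simp), ih hlt', ?_⟩
    intro a ha b hb
    obtain rfl := List.eq_of_mem_replicate ha
    obtain ⟨k', hk', hb'⟩ := List.mem_flatMap.mp hb
    obtain rfl := List.eq_of_mem_replicate hb'
    exact le_of_lt (hk _ hk')

-- sorted(xs) is the sorted distinct values, each repeated by its multiplicity
theorem sorted_eq_flatMap (xs : List Int) :
    PySem.List.sorted xs (fun x => x) =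
      (PySem.List.sorted (PySem.Set.ofList xs) (fun k => k)).flatMap
        (fun k => List.replicate (xs.count k) k) := by
  have hnd : (PySem.List.sorted (PySem.Set.ofList xs) (fun k => k)).Nodup :=
    ((PySem.List.sorted_perm _ _ _).nodup_iff).mpr (PySem.Set.nodup_ofList xs)
  apply PySem.List.sorted_id_eq_of_perm_of_pairwise
  · rw [List.perm_iff_count]
    intro y
    rw [count_flatMap_replicate _ _ _ hnd]
    by_cases hy : y ∈ xs
    · rw [if_pos ((PySem.List.mem_sorted _ _ _ _).mpr ((PySem.Set.mem_ofList _ _).mpr hy))]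
    · rw [if_neg (fun hmem => hy ((PySem.Set.mem_ofList _ _).mp
        ((PySem.List.mem_sorted _ _ _ _).mp hmem))), List.count_eq_zero.mpr hy]
  · exact pairwise_flatMap_replicate _ _ (PySem.List.sorted_ofList_pairwise_lt xs)

theorem takeWhile_eq_nil_of_forall_not (p : Int → Bool) (l : List Int)
    (h : ∀ y ∈ l, p y = false) : l.takeWhile p = [] := by
  cases l with
  | nil => rfl
  | cons a l => simp [h a (by simp)]

theorem dropWhile_eq_self_of_forall_not (p : Int → Bool) (l : List Int)
    (h : ∀ y ∈ l, p y = false) : l.dropWhile p = l := by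
  cases l with
  | nil => rfl
  | cons a l => simp [h a (by simp)]

-- the run scan over sorted(xs) visits exactly the distinct values with their counts
theorem scanRuns_flatMap (S : List Int) (cnt : Int → Nat)
    (hpos : ∀ k ∈ S, 0 < cnt k) (hlt : S.Pairwise (· < ·)) :
    ∀ (b : Int) (t : List Int),
      pvScanRuns (S.flatMap (fun k => List.replicate (cnt k) k)) b t
        = pvPairScan (S.map (fun k => (k, (cnt k : Int)))) b t := by
  induction S with
  | nil =>
    intro b t
    simp only [List.flatMap_nil, List.map_nil]
    rw [pvScanRuns]
    rfl
  | cons k S ih =>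
    intro b t
    rcases List.pairwise_cons.mp hlt with ⟨hk, hlt'⟩
    obtain ⟨c, hc⟩ : ∃ c, cnt k = c + 1 := ⟨cnt k - 1, by have := hpos k (by simp); omega⟩
    have hne : ∀ y ∈ S.flatMap (fun k => List.replicate (cnt k) k), (y == k) = false := by
      intro y hy
      obtain ⟨k', hk', hy'⟩ := List.mem_flatMap.mp hy
      obtain rfl := List.eq_of_mem_replicate hy'
      exact beq_eq_false_iff_ne.mpr (ne_of_gt (hk _ hk'))
    have hrep : List.replicate (cnt k) k = k :: List.replicate c k := by rw [hc]; rfl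
    rw [List.flatMap_cons, hrep, List.cons_append, pvScanRuns]
    have htake : ((k :: (List.replicate c k ++
        S.flatMap (fun k => List.replicate (cnt k) k))).takeWhile (fun y => y == k))
        = k :: List.replicate c k := by
      rw [List.takeWhile_cons_of_pos (by simp), List.takeWhile_append]
      rw [List.takeWhile_replicate]
      simp [takeWhile_eq_nil_of_forall_not _ _ hne]
    have hdrop : ((k :: (List.replicate c k ++
        S.flatMap (fun k => List.replicate (cnt k) k))).dropWhile (fun y => y == k))
        = S.flatMap (fun k => List.replicate (cnt k) k) := by
      rw [List.dropWhile_cons_of_pos (by simp), List.dropWhile_append]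
      rw [List.dropWhile_replicate]
      simp [dropWhile_eq_self_of_forall_not _ _ hne]
    simp only [htake, hdrop]
    rw [List.map_cons, pvPairScan]
    simp only [List.length_cons, List.length_replicate]
    have hcnt : ((c + 1 : Nat) : Int) = ((cnt k : Nat) : Int) := by rw [hc]
    rw [hcnt]
    have ih' := ih (fun k hk' => hpos k (by simp [hk'])) hlt'
    split_ifs with h1 h2 <;> exact ih' _ _

theorem foldl_max_le (l : List Int) (m : Int) (h : ∀ x ∈ l, x ≤ m) :
    ∀ b, b ≤ m → l.foldl max b ≤ m := by
  induction l with
  | nil => intro b hb; simpa using hb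
  | cons a l ih =>
    intro b hb
    rw [List.foldl_cons]
    exact ih (fun x hx => h x (by simp [hx])) _ (max_le hb (h a (by simp)))

theorem foldl_max_eq_maxD (l : List Int) (hne : l ≠ []) (hnn : ∀ x ∈ l, 0 ≤ x) :
    l.foldl max 0 = (PySem.List.max? l (fun v => v)).getD 0 := by
  rcases hm : PySem.List.max? l (fun v => v) with _ | m
  · exact absurd ((PySem.List.max?_eq_none_iff _ _).mp hm) hne
  · have hmem : m ∈ l := PySem.List.max?_mem hm
    simp only [Option.getD_some]
    refine le_antisymm ?_ ((PySem.List.le_foldl_max l 0).2 m hmem)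
    exact foldl_max_le l m (fun x hx => PySem.List.max?_isMax hm x hx) 0 (hnn m hmem)

theorem pvPairScan_spec (ps : List (Int × Int)) :
    ∀ (b : Int) (t : List Int) (M : Int), M = (ps.map Prod.snd).foldl max b →
    pvPairScan ps b t =
      (if b = M then t else []) ++ (ps.filter (fun p => p.2 == M)).map Prod.fst := by
  induction ps with
  | nil =>
    intro b t M hM
    simp only [List.map_nil, List.foldl_nil] at hM
    simp [pvPairScan, hM]
  | cons p rest ih =>
    intro b t M hM
    obtain ⟨k, c⟩ := p
    simp only [List.map_cons, List.foldl_cons] at hM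
    have hcM : c ≤ M := le_trans (le_max_right b c)
      (by rw [hM]; exact (PySem.List.le_foldl_max _ _).1)
    have hbM : b ≤ M := le_trans (le_max_left b c)
      (by rw [hM]; exact (PySem.List.le_foldl_max _ _).1)
    rw [pvPairScan, List.filter_cons]
    by_cases h1 : c > b
    · rw [if_pos h1, ih c [k] M (by rw [hM]; congr 1; omega)]
      have hbne : ¬ (b = M) := by omega
      simp only [if_neg hbne, List.nil_append]
      by_cases hc : c = M
      · simp [hc]
      · simp only [show ((k, c).2 == M) = false from beq_eq_false_iff_ne.mpr hc]
        simp [hc]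
    · rw [if_neg h1]
      by_cases h2 : c = b
      · rw [if_pos (beq_iff_eq.mpr h2), ih b (t ++ [k]) M (by rw [hM]; congr 1; omega)]
        by_cases hb : b = M
        · have : ((k, c).2 == M) = true := beq_iff_eq.mpr (by omega)
          simp [hb, this]
        · have : ((k, c).2 == M) = false := beq_eq_false_iff_ne.mpr (by omega)
          simp [hb, this]
      · rw [if_neg (by simpa using h2), ih b t M (by rw [hM]; congr 1; omega)]
        have : ((k, c).2 == M) = false := beq_eq_false_iff_ne.mpr (by omega)
        simp [this]

theorem B_eq_canon (xs : List Int) (h : xs ≠ []) :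
    getMostCommonOrMediumValue_py_alt xs = pvCanon xs := by
  unfold getMostCommonOrMediumValue_py_alt pvCanon
  rw [if_neg h]
  dsimp only
  have hlt := PySem.List.sorted_ofList_pairwise_lt xs
  have hpos : ∀ k ∈ PySem.List.sorted (PySem.Set.ofList xs) (fun k => k), 0 < xs.count k := by
    intro k hk
    exact List.count_pos_iff.mpr ((PySem.Set.mem_ofList _ _).mp
      ((PySem.List.mem_sorted _ _ _ _).mp hk))
  have hSne : PySem.List.sorted (PySem.Set.ofList xs) (fun k => k) ≠ [] := by
    intro hnil
    rw [PySem.List.sorted_eq_nil_iff] at hnil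
    obtain ⟨x, rest, rfl⟩ := List.exists_cons_of_ne_nil h
    have : x ∈ PySem.Set.ofList (x :: rest) := (PySem.Set.mem_ofList _ _).mpr (by simp)
    rw [hnil] at this
    exact absurd this (by simp)
  rw [sorted_eq_flatMap xs, scanRuns_flatMap _ _ hpos hlt 0 []]
  have hM : (PySem.List.max? ((PySem.List.sorted (PySem.Set.ofList xs) (fun k => k)).map
        (fun k => (xs.count k : Int))) (fun v => v)).getD 0
      = (((PySem.List.sorted (PySem.Set.ofList xs) (fun k => k)).map
        (fun k => ((k, (xs.count k : Int)))) |>.map Prod.snd).foldl max 0) := by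
    rw [List.map_map]
    have he : (Prod.snd ∘ fun k => (k, (xs.count k : Int)))
        = fun k => (xs.count k : Int) := rfl
    rw [he]
    refine (foldl_max_eq_maxD _ (by simpa using hSne) ?_).symm
    intro x hx
    obtain ⟨k, hk, rfl⟩ := List.mem_map.mp hx
    positivity
  rw [pvPairScan_spec _ 0 [] _ hM]
  have hnil : ∀ (c : Prop) [Decidable c], (if c then ([] : List Int) else []) = [] := by intro c _; split <;> rfl
  rw [hnil, List.nil_append, List.filter_map, List.map_map]
  simp [Function.comp_def]

-- ===== VERDICT (by name: the statement is the Claim_ definition above) =====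
theorem getMostCommonOrMediumValue_py_spec : Claim_equal_getMostCommonOrMediumValue_py := by
  intro xs _ hpre
  unfold Spec_getMostCommonOrMediumValue_py
  rw [A_eq_canon xs hpre, B_eq_canon xs hpre]
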